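-- pv_equiv track=rewrite | github.com/Thestartofyou/dominant-strategy-equilibrium | main - 2024-02-15T214903.879.py | find_dominant_strategy
-- ===== SOURCE A (Python) =====
-- def find_dominant_strategy(matrix):
--     """
--     Find dominant strategy for a player in a given payoff matrix.
--
--     Parameters:
--     matrix (list of lists): Payoff matrix representing the game.
--
--     Returns:
--     int or None: Index of the dominant strategy for the player, or None if no dominant strategy exists.
--     """
--     num_strategies = len(matrix)
--     for i in range(num_strategies):
--         is_dominant = True
--         for j in range(num_strategies):
--             if matrix[i] < matrix[j]:
--                 is_dominant = False
--                 break
--         if is_dominant: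
--             return i
--     return None
-- ===== SOURCE B (Python) =====
-- def find_dominant_strategy(matrix):
--     """Take the lexicographically maximum row and return its first index."""
--     if not matrix:
--         return None
--     return matrix.index(max(matrix))
-- ===== Notes on version B (the rewrite author's own statement) =====
-- stated objective: idiomatic
-- what changed: A scans all pairs of rows for a row not lexicographically smaller than any other; B just takes max(matrix) and returns its first index via list.index.
import Mathlib
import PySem

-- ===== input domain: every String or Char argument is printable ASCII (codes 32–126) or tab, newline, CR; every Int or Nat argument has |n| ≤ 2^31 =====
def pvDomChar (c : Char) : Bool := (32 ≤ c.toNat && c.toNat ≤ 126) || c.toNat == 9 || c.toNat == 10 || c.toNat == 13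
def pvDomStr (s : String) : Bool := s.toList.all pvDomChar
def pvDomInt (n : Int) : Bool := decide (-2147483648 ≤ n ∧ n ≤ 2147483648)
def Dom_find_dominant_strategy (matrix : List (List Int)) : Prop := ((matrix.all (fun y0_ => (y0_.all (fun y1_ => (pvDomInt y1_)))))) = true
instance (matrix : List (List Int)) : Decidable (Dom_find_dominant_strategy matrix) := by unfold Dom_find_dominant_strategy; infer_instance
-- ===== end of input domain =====

-- B replaces A's all-pairs dominance scan with the idiomatic max-then-first-index:
-- matrix.index(max(matrix)) (Python's `<` on lists = Lean's `<` on List Int).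

-- ===== PORT A =====
-- outer `for i in range(num_strategies)` loop; the inner `for j` loop with its
-- `break`/`is_dominant` flag computes exactly `matrix.all (fun mj => !(matrix[i] < mj))`.
def fdsLoop (matrix : List (List Int)) : List (List Int) → Int → Option Int
  | [], _ => none
  | mi :: rest, i =>
    if matrix.all (fun mj => !(decide (mi < mj))) then some i
    else fdsLoop matrix rest (i + 1)

def find_dominant_strategy (matrix : List (List Int)) : Option Int :=
  fdsLoop matrix matrix 0

-- ===== PORT B =====
-- Source B: `if not matrix: return None; return matrix.index(max(matrix))`
-- (max = PySem.List.max?, first maximal element; .index = PySem.List.index?, first match).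
def find_dominant_strategy_alt (matrix : List (List Int)) : Option Int :=
  if matrix = [] then none
  else match PySem.List.max? matrix (fun r => r) with
       | none => none
       | some best => (PySem.List.index? matrix best).map (fun k => (k : Int))

-- ===== PRECONDITION & SPEC =====
def Spec_find_dominant_strategy (matrix : List (List Int)) (out : Option Int) : Prop := out = find_dominant_strategy_alt matrix
instance (matrix : List (List Int)) (out : Option Int) : Decidable (Spec_find_dominant_strategy matrix out) := by unfold Spec_find_dominant_strategy; infer_instance

-- ===== CLAIM (what is proved, stated in full; the proofs are below) =====
def Claim_equal_find_dominant_strategy : Prop := ∀ (matrix : List (List Int)), Dom_find_dominant_strategy matrix → Spec_find_dominant_strategy matrix (find_dominant_strategy matrix)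

-- ===== LEMMAS AND PROOFS =====

-- `o` is the (Int-valued) index of the first lexicographically maximal row of `l`
-- (none iff l = []). Both ports satisfy this, and it is unique.
def FirstMax (l : List (List Int)) (o : Option Int) : Prop :=
  match o with
  | none => l = []
  | some i => ∃ k : Nat, i = (k : Int) ∧ ∃ h : k < l.length,
      (∀ r ∈ l, r ≤ l[k]) ∧ (∀ j, (hj : j < l.length) → j < k → l[j] < l[k])

theorem firstMax_unique (l : List (List Int)) (o₁ o₂ : Option Int)
    (h₁ : FirstMax l o₁) (h₂ : FirstMax l o₂) : o₁ = o₂ := by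
  match o₁, o₂ with
  | none, none => rfl
  | none, some i =>
    simp only [FirstMax] at h₁ h₂
    obtain ⟨k, _, hk, _⟩ := h₂; subst h₁; simp at hk
  | some i, none =>
    simp only [FirstMax] at h₁ h₂
    obtain ⟨k, _, hk, _⟩ := h₁; subst h₂; simp at hk
  | some i₁, some i₂ =>
    simp only [FirstMax] at h₁ h₂
    obtain ⟨k₁, rfl, hk₁, hmax₁, hfst₁⟩ := h₁
    obtain ⟨k₂, rfl, hk₂, hmax₂, hfst₂⟩ := h₂
    rcases Nat.lt_trichotomy k₁ k₂ with h | h | h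
    · exact absurd (hmax₁ _ (l.getElem_mem hk₂)) (not_le_of_gt (hfst₂ k₁ hk₁ h))
    · simp [h]
    · exact absurd (hmax₂ _ (l.getElem_mem hk₁)) (not_le_of_gt (hfst₁ k₂ hk₂ h))

theorem exists_max_row (l : List (List Int)) (h : l ≠ []) :
    ∃ a ∈ l, ∀ b ∈ l, b ≤ a := by
  induction l with
  | nil => exact absurd rfl h
  | cons x xs ih =>
    rcases eq_or_ne xs [] with rfl | hxs
    · exact ⟨x, by simp⟩
    · obtain ⟨a, ha, hmax⟩ := ih hxs
      rcases le_total a x with hle | hle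
      · exact ⟨x, by simp, by
          intro b hb
          rcases List.mem_cons.mp hb with rfl | hb
          · exact le_refl b
          · exact le_trans (hmax b hb) hle⟩
      · exact ⟨a, List.mem_cons_of_mem _ ha, by
          intro b hb
          rcases List.mem_cons.mp hb with rfl | hb
          · exact hle
          · exact hmax b hb⟩

-- A's loop in terms of findIdx?.
theorem fdsLoop_eq_findIdx? (matrix : List (List Int)) (l : List (List Int)) (i : Int) :
    fdsLoop matrix l i =
      (l.findIdx? (fun mi => matrix.all (fun mj => !(decide (mi < mj))))).map
        (fun k => i + (k : Int)) := by
  induction l generalizing i with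
  | nil => simp [fdsLoop]
  | cons x xs ih =>
    rw [fdsLoop, List.findIdx?_cons]
    split
    · next h => simp
    · next h =>
      rw [ih]
      cases List.findIdx? (fun mi => matrix.all (fun mj => !(decide (mi < mj)))) xs with
      | none => simp
      | some k =>
        simp
        ring

theorem find_dominant_strategy_firstMax (matrix : List (List Int)) :
    FirstMax matrix (find_dominant_strategy matrix) := by
  unfold find_dominant_strategy
  rw [fdsLoop_eq_findIdx?]
  rcases hfi : matrix.findIdx? (fun mi => matrix.all (fun mj => !(decide (mi < mj)))) with _ | k
  · -- none: every row fails the predicate, so matrix must be empty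
    simp only [FirstMax]
    by_contra hne
    obtain ⟨a, ha, hmax⟩ := exists_max_row matrix hne
    have := List.findIdx?_eq_none_iff.mp hfi a ha
    simp only [List.all_eq_false, Bool.not_eq_true'] at this
    obtain ⟨b, hb, hab⟩ := this
    simp at hab
    exact absurd (hmax b hb) (not_le_of_gt hab)
  · obtain ⟨hk, hpk, hprev⟩ := List.findIdx?_eq_some_iff_getElem.mp hfi
    simp only [FirstMax, zero_add]
    refine ⟨k, rfl, hk, ?_, ?_⟩
    · intro r hr
      simp only [List.all_eq_true, Bool.not_eq_eq_eq_not, Bool.not_true,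
        decide_eq_false_iff_not] at hpk
      exact not_lt.mp (hpk r hr)
    · intro j hj hjk
      have hfail := hprev j hjk
      simp only [Bool.not_eq_true, List.all_eq_false, Bool.not_eq_true'] at hfail
      obtain ⟨b, hb, hjb⟩ := hfail
      simp at hjb
      simp only [List.all_eq_true, Bool.not_eq_eq_eq_not, Bool.not_true,
        decide_eq_false_iff_not] at hpk
      exact lt_of_lt_of_le hjb (not_lt.mp (hpk b hb))

theorem find_dominant_strategy_alt_firstMax (matrix : List (List Int)) :
    FirstMax matrix (find_dominant_strategy_alt matrix) := by
  unfold find_dominant_strategy_alt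
  split
  · next h => subst h; exact rfl
  · next hne =>
    rcases hmx : PySem.List.max? matrix (fun r => r) with _ | best
    · exact absurd ((PySem.List.max?_eq_none_iff matrix (fun r => r)).mp hmx) hne
    · have hmem : best ∈ matrix := PySem.List.max?_mem hmx
      have hisMax : ∀ y ∈ matrix, y ≤ best := PySem.List.max?_isMax (by convert hmx using 2)
      obtain ⟨k, hidx⟩ := Option.isSome_iff_exists.mp ((PySem.List.index?_isSome_iff matrix best).mpr hmem)
      obtain ⟨hk, hget, hprev⟩ := PySem.List.getElem_of_index?_eq_some hidx
      simp only [hidx]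
      exact ⟨k, rfl, hk, by rw [hget]; exact hisMax,
        fun j hj hjk => lt_of_le_of_ne (hget ▸ hisMax _ (matrix.getElem_mem hj))
          (hget ▸ hprev j hjk)⟩

-- ===== VERDICT (by name: the statement is the Claim_ definition above) =====
theorem find_dominant_strategy_spec : Claim_equal_find_dominant_strategy := by
  intro matrix _
  unfold Spec_find_dominant_strategy
  exact firstMax_unique matrix _ _ (find_dominant_strategy_firstMax matrix)
    (find_dominant_strategy_alt_firstMax matrix)
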